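-- pv_equiv track=rewrite | github.com/mukthavaramsaijeevan28-cmd/CS2201 | Assignment 3/Task_1.py | make_undirected
-- ===== SOURCE A (Python) =====
-- def make_undirected(graph):
--     undirected = {}
--     for u, neighbors in graph.items():
--         undirected.setdefault(u, {})
--         for v, w in neighbors.items():
--             if v not in undirected:
--                 undirected[v] = {}
--             if undirected[u].get(v, float('inf')) > w:
--                 undirected[u][v] = w
--             if undirected[v].get(u, float('inf')) > w:
--                 undirected[v][u] = w
--     return undirected
-- ===== SOURCE B (Python) =====
-- def make_undirected(graph):
--     # pass 1: minimum weight of each undirected edge, taken over both directions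
--     weight = {}
--     for u, neighbors in graph.items():
--         for v, w in neighbors.items():
--             k = min((u, v), (v, u))
--             if k not in weight or w < weight[k]:
--                 weight[k] = w
--     # pass 2: lay out the symmetric adjacency, scanning the input so that nodes
--     # and neighbours appear in encounter order; every entry is written directly
--     # with its final weight, so no comparisons are needed here
--     undirected = {}
--     for u, neighbors in graph.items():
--         undirected.setdefault(u, {})
--         for v in neighbors:
--             w = weight[min((u, v), (v, u))]
--             undirected.setdefault(v, {})
--             undirected[u][v] = w
--             undirected[v][u] = w
--     return undirected
-- ===== Notes on version B (the rewrite author's own statement) =====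
-- stated objective: alternative
-- what changed: A merges each directed edge into the nested dict with two conditional min-updates in one pass; B first builds an index of minimum weights keyed by the canonical unordered pair, then a second scan of the input lays out the symmetric adjacency by writing each entry its final weight unconditionally.
import Mathlib
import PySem

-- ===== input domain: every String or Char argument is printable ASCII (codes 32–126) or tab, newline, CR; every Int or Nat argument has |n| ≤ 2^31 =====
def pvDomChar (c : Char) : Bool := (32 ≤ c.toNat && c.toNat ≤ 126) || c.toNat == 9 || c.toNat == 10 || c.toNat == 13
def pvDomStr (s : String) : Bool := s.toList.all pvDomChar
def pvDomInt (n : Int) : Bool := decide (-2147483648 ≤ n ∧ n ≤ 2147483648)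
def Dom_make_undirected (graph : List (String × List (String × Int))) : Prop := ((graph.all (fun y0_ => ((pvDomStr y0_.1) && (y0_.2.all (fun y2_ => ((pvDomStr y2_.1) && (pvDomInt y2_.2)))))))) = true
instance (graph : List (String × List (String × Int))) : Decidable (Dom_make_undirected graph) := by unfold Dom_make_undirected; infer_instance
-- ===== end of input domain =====

-- B replaces A's one-pass conditional min-updates by two passes: build an index of minimum
-- weights keyed by the canonical unordered pair, then rescan the input and lay out the
-- symmetric adjacency with unconditional writes (objective: alternative decomposition).

-- ===== PORT A =====
-- `undirected[u].get(v, float('inf')) > w`: the default inf compares greater than any int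
def pvInfGT (o : Option Int) (w : Int) : Bool :=
  match o with
  | none => true
  | some x => decide (w < x)

def pvStepA (D : PySem.Dict String (PySem.Dict String Int)) (u : String) (q : String × Int) :
    PySem.Dict String (PySem.Dict String Int) :=
  let D1 := if D.contains q.1 then D else D.insert q.1 PySem.Dict.empty
  let D2 := if pvInfGT ((D1.getD u PySem.Dict.empty).get? q.1) q.2
            then D1.modify u PySem.Dict.empty (fun inner => inner.insert q.1 q.2) else D1
  if pvInfGT ((D2.getD q.1 PySem.Dict.empty).get? u) q.2
  then D2.modify q.1 PySem.Dict.empty (fun inner => inner.insert u q.2) else D2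

def pvRunA (graph : List (String × List (String × Int))) : PySem.Dict String (PySem.Dict String Int) :=
  graph.foldl
    (fun D p => p.2.foldl (fun D q => pvStepA D p.1 q) (D.setdefault p.1 PySem.Dict.empty))
    PySem.Dict.empty

def make_undirected (graph : List (String × List (String × Int))) : List (String × List (String × Int)) :=
  (pvRunA graph).items.map (fun p => (p.1, p.2.items))

-- ===== PORT B =====
-- `min((u, v), (v, u))`: Python's tuple min is lexicographic, so it is (u, v) iff u ≤ v
def pvEdgeKey (u v : String) : String × String := if u ≤ v then (u, v) else (v, u)

-- `if k not in weight or w < weight[k]: weight[k] = w`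
def pvPass1Step (W : PySem.Dict (String × String) Int) (u : String) (q : String × Int) :
    PySem.Dict (String × String) Int :=
  let k := pvEdgeKey u q.1
  if W.contains k = false then W.insert k q.2
  else if q.2 < W.getD k 0 then W.insert k q.2 else W

-- `w = weight[min((u, v), (v, u))]` never raises (pass 1 saw this edge) and
-- `undirected[u][...]` never raises (u was setdefault'd), so the defaults are unreachable
def pvPass2Step (W : PySem.Dict (String × String) Int)
    (D : PySem.Dict String (PySem.Dict String Int)) (u v : String) :
    PySem.Dict String (PySem.Dict String Int) :=
  let w := W.getD (pvEdgeKey u v) 0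
  let D1 := D.setdefault v PySem.Dict.empty
  let D2 := D1.modify u PySem.Dict.empty (fun inner => inner.insert v w)
  D2.modify v PySem.Dict.empty (fun inner => inner.insert u w)

def pvWeights (graph : List (String × List (String × Int))) : PySem.Dict (String × String) Int :=
  graph.foldl (fun W p => p.2.foldl (fun W q => pvPass1Step W p.1 q) W) PySem.Dict.empty

def pvRunB (graph : List (String × List (String × Int))) : PySem.Dict String (PySem.Dict String Int) :=
  let W := pvWeights graph
  graph.foldl
    (fun D p => p.2.foldl (fun D q => pvPass2Step W D p.1 q.1) (D.setdefault p.1 PySem.Dict.empty))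
    PySem.Dict.empty

def make_undirected_alt (graph : List (String × List (String × Int))) : List (String × List (String × Int)) :=
  (pvRunB graph).items.map (fun p => (p.1, p.2.items))

-- ===== PRECONDITION & SPEC =====
def Spec_make_undirected (graph : List (String × List (String × Int))) (out : List (String × List (String × Int))) : Prop := out = make_undirected_alt graph
instance (graph : List (String × List (String × Int))) (out : List (String × List (String × Int))) : Decidable (Spec_make_undirected graph out) := by unfold Spec_make_undirected; infer_instance

-- ===== CLAIM (what is proved, stated in full; the proofs are below) =====
def Claim_equal_make_undirected : Prop := ∀ (graph : List (String × List (String × Int))), Dom_make_undirected graph → Spec_make_undirected graph (make_undirected graph)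

-- ===== LEMMAS AND PROOFS =====

-- Proof skeleton: a ghost machine carrying the pair-min table W and the neighbour orders O;
-- both ports' states are shown to be pvRenderF of the ghost state.
def pvSkelStep (s : PySem.Dict (String × String) Int × PySem.Dict String (List String))
    (u : String) (q : String × Int) :
    PySem.Dict (String × String) Int × PySem.Dict String (List String) :=
  let k := pvEdgeKey u q.1
  match s.1.get? k with
  | some x => (s.1.insert k (min x q.2), s.2)
  | none =>
      let O := (s.2.setdefault q.1 []).modify u [] (fun l => l ++ [q.1])
      (s.1.insert k q.2, if q.1 = u then O else O.modify q.1 [] (fun l => l ++ [u]))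

def pvSkelRun (graph : List (String × List (String × Int))) :
    PySem.Dict (String × String) Int × PySem.Dict String (List String) :=
  graph.foldl
    (fun s p => p.2.foldl (fun s q => pvSkelStep s p.1 q) (s.1, s.2.setdefault p.1 []))
    (PySem.Dict.empty, PySem.Dict.empty)

-- A nested dict, reconstructed from the ghost neighbour orders and a value function
def pvRenderF (O : PySem.Dict String (List String)) (f : String → String → Int) :
    PySem.Dict String (PySem.Dict String Int) :=
  PySem.Dict.mk (O.items.map (fun p => (p.1, PySem.Dict.mk (p.2.map (fun b => (b, f p.1 b))))))

-- the weight table read as a symmetric value function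
def pvVal (W : PySem.Dict (String × String) Int) (a b : String) : Int :=
  W.getD (pvEdgeKey a b) 0

-- the loop invariant tying the ghost tables together
def pvInv (W : PySem.Dict (String × String) Int) (O : PySem.Dict String (List String)) : Prop :=
  O.keys.Nodup ∧ ∀ a b : String, b ∈ O.getD a [] ↔ W.contains (pvEdgeKey a b) = true

theorem pvEdgeKey_comm (a b : String) : pvEdgeKey a b = pvEdgeKey b a := by
  unfold pvEdgeKey
  by_cases h1 : a ≤ b <;> by_cases h2 : b ≤ a
  · have := le_antisymm h1 h2; subst this; simp
  · simp [h1, h2]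
  · simp [h1, h2]
  · exact absurd (le_total a b) (by simp [h1, h2])

theorem pvEdgeKey_inj {a b u v : String} (h : pvEdgeKey a b = pvEdgeKey u v) :
    (a = u ∧ b = v) ∨ (a = v ∧ b = u) := by
  unfold pvEdgeKey at h
  by_cases h1 : a ≤ b <;> by_cases h2 : u ≤ v <;>
    simp only [h1, h2, if_true, if_false, Prod.mk.injEq] at h <;> tauto

theorem pvEdgeKey_self_iff {a b u : String} : pvEdgeKey a b = pvEdgeKey u u ↔ a = u ∧ b = u := by
  constructor
  · intro h
    rcases pvEdgeKey_inj h with ⟨rfl, rfl⟩ | ⟨rfl, rfl⟩ <;> exact ⟨rfl, rfl⟩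
  · rintro ⟨rfl, rfl⟩; rfl

theorem pvGet?_of_contains {κ ν : Type} [BEq κ] [LawfulBEq κ] (d : PySem.Dict κ ν) (a : κ)
    (dflt : ν) (hc : d.contains a = true) : d.get? a = some (d.getD a dflt) := by
  rw [PySem.Dict.contains_eq_isSome_get?] at hc
  obtain ⟨val, hval⟩ := Option.isSome_iff_exists.mp hc
  rw [PySem.Dict.getD_eq_get?_getD, hval]; rfl

theorem pvMem_contains {κ β : Type} [BEq κ] [LawfulBEq κ] (d : PySem.Dict κ (List β)) {a : κ}
    {b : β} (hb : b ∈ d.getD a []) : d.contains a = true := by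
  by_cases hc : d.contains a = true
  · exact hc
  · exfalso
    have hn : d.get? a = none := (PySem.Dict.get?_eq_none_iff_contains d a).mpr (by simpa using hc)
    rw [PySem.Dict.getD_eq_get?_getD, hn] at hb
    simp at hb

theorem pvReplaceSelf {κ ν : Type} [BEq κ] [LawfulBEq κ] (l : List (κ × ν)) (a : κ) (ns : ν)
    (hnd : (l.map (fun p => p.1)).Nodup) (hg : (PySem.Dict.mk l).get? a = some ns) :
    l.map (fun p => if p.1 == a then (a, ns) else p) = l := by
  induction l with
  | nil => rfl
  | cons hd t ih =>
    rcases hd with ⟨k, v⟩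
    rw [PySem.Dict.get?_mk_cons] at hg
    simp only [List.map_cons] at hnd
    have hnd' := List.nodup_cons.mp hnd
    by_cases hk : k = a
    · subst hk
      simp only [beq_self_eq_true, if_true] at hg
      obtain rfl : ns = v := by simpa using hg.symm
      simp only [List.map_cons, beq_self_eq_true, if_true]
      refine congrArg (_ :: ·) ?_
      calc t.map (fun p => if p.1 == k then (k, ns) else p)
          = t.map id := List.map_congr_left (fun p hp => by
            have hne : p.1 ≠ k := fun e => hnd'.1 (List.mem_map.mpr ⟨p, hp, e⟩)
            simp [hne])
        _ = t := List.map_id t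
    · simp only [List.map_cons]
      rw [if_neg (by simpa using hk)] at hg
      rw [if_neg (by simpa using hk)]
      refine congrArg (_ :: ·) (ih hnd'.2 hg)

theorem pvInsertSelf {κ ν : Type} [BEq κ] [LawfulBEq κ] {d : PySem.Dict κ ν} {a : κ} {ns : ν}
    (hnd : d.keys.Nodup) (hg : d.get? a = some ns) : d.insert a ns = d := by
  have hc : d.contains a = true := by
    rw [PySem.Dict.contains_eq_isSome_get?, hg]; rfl
  rcases d with ⟨l⟩
  unfold PySem.Dict.insert
  rw [if_pos hc]
  exact congrArg PySem.Dict.mk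
    (pvReplaceSelf l a ns (by simpa [PySem.Dict.keys] using hnd) hg)

theorem pvGet?_append {κ ν : Type} [BEq κ] (l : List (κ × ν)) (k a : κ) (v : ν) :
    (PySem.Dict.mk (l ++ [(k, v)])).get? a
      = ((PySem.Dict.mk l).get? a).or (if k == a then some v else none) := by
  induction l with
  | nil =>
    simp only [List.nil_append]
    rw [PySem.Dict.get?_mk_cons]
    by_cases hk : (k == a) = true <;> simp [hk, PySem.Dict.get?]
  | cons hd t ih =>
    rcases hd with ⟨k', v'⟩
    simp only [List.cons_append]
    rw [PySem.Dict.get?_mk_cons, PySem.Dict.get?_mk_cons]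
    by_cases hk' : (k' == a) = true <;> simp [hk', ih]

theorem pvGetD_setdefault {κ ν : Type} [BEq κ] [LawfulBEq κ] (d : PySem.Dict κ ν) (k a : κ)
    (v : ν) : (d.setdefault k v).getD a v = d.getD a v := by
  unfold PySem.Dict.setdefault
  by_cases hc : d.contains k = true
  · rw [if_pos hc]
  · rw [if_neg hc]
    rw [PySem.Dict.getD_eq_get?_getD, PySem.Dict.getD_eq_get?_getD, pvGet?_append]
    cases hda : d.get? a with
    | some x => simp
    | none => by_cases hk : (k == a) = true <;> simp [hk]

theorem pvContains_setdefault_self {κ ν : Type} [BEq κ] [LawfulBEq κ] (d : PySem.Dict κ ν)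
    (k : κ) (v : ν) : (d.setdefault k v).contains k = true := by
  rw [PySem.Dict.contains_eq_isSome_get?, PySem.Dict.get?_setdefault_self]; rfl

theorem pvContains_setdefault_of {κ ν : Type} [BEq κ] (d : PySem.Dict κ ν) {a : κ} (k : κ)
    (v : ν) (h : d.contains a = true) : (d.setdefault k v).contains a = true := by
  unfold PySem.Dict.setdefault
  by_cases hc : d.contains k = true
  · rw [if_pos hc]; exact h
  · rw [if_neg hc]
    unfold PySem.Dict.contains at h ⊢
    simp only [PySem.Dict.items] at h ⊢
    rw [List.any_append]
    simp [h]

theorem pvRenderF_contains (O : PySem.Dict String (List String)) (f : String → String → Int)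
    (x : String) : (pvRenderF O f).contains x = O.contains x := by
  unfold pvRenderF PySem.Dict.contains
  simp only [PySem.Dict.items, List.any_map]
  rfl

theorem pvRenderF_congr {O : PySem.Dict String (List String)} {f g : String → String → Int}
    (h : ∀ a b, f a b = g a b) : pvRenderF O f = pvRenderF O g := by
  have : f = g := funext fun a => funext fun b => h a b
  rw [this]

theorem pvRenderF_get? (O : PySem.Dict String (List String)) (f : String → String → Int)
    (a : String) :
    (pvRenderF O f).get? a
      = (O.get? a).map (fun ns => PySem.Dict.mk (ns.map (fun b => (b, f a b)))) := by
  rcases O with ⟨l⟩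
  induction l with
  | nil => rfl
  | cons p t ih =>
    rcases p with ⟨key, ns⟩
    unfold pvRenderF at ih ⊢
    simp only [PySem.Dict.items, List.map_cons]
    rw [PySem.Dict.get?_mk_cons, PySem.Dict.get?_mk_cons]
    by_cases hk : (key == a) = true
    · have : key = a := by simpa using hk
      subst this
      simp
    · rw [if_neg hk, if_neg hk]
      exact ih

theorem pvRenderF_getD (O : PySem.Dict String (List String)) (f : String → String → Int)
    (a : String) :
    (pvRenderF O f).getD a PySem.Dict.empty
      = PySem.Dict.mk ((O.getD a []).map (fun b => (b, f a b))) := by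
  rw [PySem.Dict.getD_eq_get?_getD, PySem.Dict.getD_eq_get?_getD, pvRenderF_get?]
  cases O.get? a <;> rfl

theorem pvRenderF_keys (O : PySem.Dict String (List String)) (f : String → String → Int) :
    (pvRenderF O f).keys = O.keys := by
  unfold pvRenderF PySem.Dict.keys
  simp only [PySem.Dict.items, List.map_map]
  rfl

theorem pvInnerGet (ns : List String) (f : String → Int) (v : String) :
    (PySem.Dict.mk (ns.map (fun b => (b, f b)))).get? v
      = if v ∈ ns then some (f v) else none := by
  induction ns with
  | nil => simp [PySem.Dict.get?]
  | cons a t ih =>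
    simp only [List.map_cons]
    rw [PySem.Dict.get?_mk_cons]
    by_cases hav : a = v
    · subst hav; simp
    · rw [if_neg (by simpa using hav), ih]
      simp [hav, Ne.symm hav]

theorem pvInnerContains (ns : List String) (f : String → Int) (v : String) :
    (PySem.Dict.mk (ns.map (fun b => (b, f b)))).contains v = decide (v ∈ ns) := by
  rw [PySem.Dict.contains_eq_isSome_get?, pvInnerGet]
  by_cases h : v ∈ ns <;> simp [h]

theorem pvInnerInsert_mem {ns : List String} {v : String} (f : String → Int) (w : Int)
    (h : v ∈ ns) :
    (PySem.Dict.mk (ns.map (fun b => (b, f b)))).insert v w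
      = PySem.Dict.mk (ns.map (fun b => (b, if b = v then w else f b))) := by
  unfold PySem.Dict.insert
  rw [pvInnerContains, if_pos (by simp [h])]
  refine congrArg PySem.Dict.mk ?_
  rw [List.map_map]
  apply List.map_congr_left
  intro b _
  by_cases hb : b = v
  · subst hb; simp [Function.comp]
  · simp [Function.comp, hb]

theorem pvInnerInsert_not_mem {ns : List String} {v : String} (f : String → Int) (w : Int)
    (h : v ∉ ns) :
    (PySem.Dict.mk (ns.map (fun b => (b, f b)))).insert v w
      = PySem.Dict.mk ((ns ++ [v]).map (fun b => (b, if b = v then w else f b))) := by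
  unfold PySem.Dict.insert
  rw [pvInnerContains, if_neg (by simp [h])]
  refine congrArg PySem.Dict.mk ?_
  rw [List.map_append]
  congr 1
  · apply List.map_congr_left
    intro b hb
    have : b ≠ v := fun e => h (e ▸ hb)
    simp [this]
  · simp

theorem pvRenderF_insert (O : PySem.Dict String (List String)) (f : String → String → Int)
    (a : String) (ns' : List String) (g : String → Int) :
    (pvRenderF O f).insert a (PySem.Dict.mk (ns'.map (fun b => (b, g b))))
      = pvRenderF (O.insert a ns') (fun x y => if x = a then g y else f x y) := by
  unfold PySem.Dict.insert
  rw [pvRenderF_contains]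
  by_cases hc : O.contains a = true
  · rw [if_pos hc, if_pos hc]
    unfold pvRenderF
    simp only [PySem.Dict.items, List.map_map]
    refine congrArg PySem.Dict.mk ?_
    apply List.map_congr_left
    intro p _
    by_cases hpa : p.1 = a
    · simp [Function.comp, hpa]
    · simp [Function.comp, hpa]
  · rw [if_neg hc, if_neg hc]
    unfold pvRenderF
    simp only [PySem.Dict.items]
    refine congrArg PySem.Dict.mk ?_
    have hmap : O.items.map (fun p => (p.1, PySem.Dict.mk (p.2.map (fun b => (b, f p.1 b)))))
        = O.items.map (fun p => (p.1, PySem.Dict.mk (p.2.map (fun b =>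
            (b, if p.1 = a then g b else f p.1 b))))) := by
      apply List.map_congr_left
      intro p hp
      have hpa : p.1 ≠ a := by
        intro e
        apply hc
        unfold PySem.Dict.contains
        exact List.any_eq_true.mpr ⟨p, hp, by simp [e]⟩
      simp [hpa]
    rw [List.map_append, hmap]
    simp

theorem pvRenderF_setdefault (O : PySem.Dict String (List String)) (f : String → String → Int)
    (u : String) :
    (pvRenderF O f).setdefault u PySem.Dict.empty = pvRenderF (O.setdefault u []) f := by
  unfold PySem.Dict.setdefault
  rw [pvRenderF_contains]
  by_cases hc : O.contains u = true
  · rw [if_pos hc, if_pos hc]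
  · rw [if_neg hc, if_neg hc]
    unfold pvRenderF
    simp only [PySem.Dict.items, List.map_append, List.map_cons, List.map_nil]
    rfl

theorem pvSetdefault_step (W : PySem.Dict (String × String) Int)
    (O : PySem.Dict String (List String)) (u : String) (h : pvInv W O) :
    pvInv W (O.setdefault u []) ∧ (O.setdefault u []).contains u = true := by
  obtain ⟨hnd, I2⟩ := h
  refine ⟨⟨?_, ?_⟩, pvContains_setdefault_self O u []⟩
  · by_cases hc : O.contains u = true
    · rw [PySem.Dict.setdefault_of_contains _ _ hc]; exact hnd
    · have heq : O.setdefault u [] = O.insert u [] := by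
        unfold PySem.Dict.setdefault PySem.Dict.insert
        rw [if_neg hc, if_neg hc]
      rw [heq]
      exact PySem.Dict.nodup_keys_insert _ _ _ hnd
  · intro a b
    rw [pvGetD_setdefault]
    exact I2 a b

theorem pvInfGT_some (x w : Int) : pvInfGT (some x) w = decide (w < x) := rfl

theorem pvInfGT_none (w : Int) : pvInfGT none w = true := rfl

-- the A-side step lemma: A's update renders the ghost step, and the invariant is preserved
theorem pvStep_eq (W : PySem.Dict (String × String) Int) (O : PySem.Dict String (List String))
    (u : String) (q : String × Int) (h : pvInv W O) (hu : O.contains u = true) :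
    pvStepA (pvRenderF O (pvVal W)) u q
        = pvRenderF (pvSkelStep (W, O) u q).2 (pvVal (pvSkelStep (W, O) u q).1)
      ∧ pvInv (pvSkelStep (W, O) u q).1 (pvSkelStep (W, O) u q).2
      ∧ (pvSkelStep (W, O) u q).2.contains u = true := by
  obtain ⟨hnd, I2⟩ := h
  rcases q with ⟨v, w⟩
  by_cases hWk : W.contains (pvEdgeKey u v) = true
  · -- the pair is already in the table: only the weight entry moves
    have hg : W.get? (pvEdgeKey u v) = some (W.getD (pvEdgeKey u v) 0) :=
      pvGet?_of_contains W _ 0 hWk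
    have muv : v ∈ O.getD u [] := (I2 u v).mpr hWk
    have mvu : u ∈ O.getD v [] := (I2 v u).mpr (by rw [pvEdgeKey_comm]; exact hWk)
    have hOv : O.contains v = true := pvMem_contains O mvu
    have hvval : pvVal W v u = pvVal W u v := by unfold pvVal; rw [pvEdgeKey_comm]
    have hB : pvSkelStep (W, O) u (v, w)
        = (W.insert (pvEdgeKey u v) (min (W.getD (pvEdgeKey u v) 0) w), O) := by
      simp [pvSkelStep, hg]
    rw [hB]
    refine ⟨?_, ⟨hnd, ?_⟩, hu⟩
    · simp only [pvStepA, pvRenderF_contains, hOv, PySem.Dict.modify, pvRenderF_getD,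
        pvInnerGet, muv, if_true, pvInfGT_some]
      by_cases hlt : w < pvVal W u v
      · have hmin : min (W.getD (pvEdgeKey u v) 0) w = w := min_eq_right (le_of_lt hlt)
        rw [hmin, if_pos (decide_eq_true hlt)]
        rw [pvInnerInsert_mem _ _ muv, pvRenderF_insert,
          pvInsertSelf hnd (pvGet?_of_contains O u [] hu)]
        rw [pvRenderF_getD]
        simp only [pvInnerGet, mvu, if_true]
        by_cases hvu : v = u
        · have hval : (if v = u then (if u = v then w else pvVal W u u) else pvVal W v u) = w := by
            rw [if_pos hvu, if_pos hvu.symm]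
          rw [hval, pvInfGT_some, if_neg (by simp)]
          apply pvRenderF_congr
          intro a b
          unfold pvVal
          rw [PySem.Dict.getD_insert]
          by_cases hab : pvEdgeKey a b = pvEdgeKey u v
          · rw [if_pos hab]
            rcases pvEdgeKey_inj hab with ⟨ha, hb⟩ | ⟨ha, hb⟩ <;> simp [ha, hb, hvu]
          · rw [if_neg hab]
            by_cases hav : a = u
            · have hbv : b ≠ v := fun e => hab (by rw [hav, e, hvu])
              have hbu : b ≠ u := fun e => hbv (by rw [e, ← hvu])
              simp [hav, hbv, hbu, hvu]
            · simp [hav, hvu]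
        · have hval : (if v = u then (if u = v then w else pvVal W u u) else pvVal W v u)
              = pvVal W u v := by rw [if_neg hvu, hvval]
          rw [hval, pvInfGT_some, if_pos (decide_eq_true hlt)]
          rw [pvInnerInsert_mem _ _ mvu, pvRenderF_insert,
            pvInsertSelf hnd (pvGet?_of_contains O v [] hOv)]
          have hne : u ≠ v := fun e => hvu e.symm
          apply pvRenderF_congr
          intro a b
          unfold pvVal
          rw [PySem.Dict.getD_insert]
          by_cases hab : pvEdgeKey a b = pvEdgeKey u v
          · rw [if_pos hab]
            rcases pvEdgeKey_inj hab with ⟨ha, hb⟩ | ⟨ha, hb⟩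
            · simp [ha, hb, hne, hvu]
            · simp [ha, hb]
          · rw [if_neg hab]
            by_cases hav : a = v
            · have hbu : b ≠ u := fun e => hab (by rw [hav, e, pvEdgeKey_comm])
              simp [hav, hbu, hvu]
            · by_cases hau : a = u
              · have hbv : b ≠ v := fun e => hab (by rw [hau, e])
                simp [hau, hbv, hne]
              · simp [hav, hau]
      · have hmin : min (W.getD (pvEdgeKey u v) 0) w = W.getD (pvEdgeKey u v) 0 :=
          min_eq_left (not_lt.mp hlt)
        rw [hmin, if_neg (show ¬(decide (w < pvVal W u v) = true) by simp [hlt])]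
        rw [pvRenderF_getD]
        simp only [pvInnerGet, mvu, if_true]
        rw [hvval, pvInfGT_some,
          if_neg (show ¬(decide (w < pvVal W u v) = true) by simp [hlt])]
        apply pvRenderF_congr
        intro a b
        unfold pvVal
        rw [PySem.Dict.getD_insert]
        by_cases hab : pvEdgeKey a b = pvEdgeKey u v
        · rw [if_pos hab, hab]
        · rw [if_neg hab]
    · -- invariant: orders unchanged, the key stays present
      intro a b
      rw [PySem.Dict.contains_insert]
      by_cases hab : pvEdgeKey a b = pvEdgeKey u v
      · constructor
        · intro _
          simp [hab]
        · intro _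
          rcases pvEdgeKey_inj hab with ⟨ha, hb⟩ | ⟨ha, hb⟩
          · rw [ha, hb]; exact muv
          · rw [ha, hb]; exact mvu
      · have hfalse : (pvEdgeKey a b == pvEdgeKey u v) = false := by simpa using hab
        rw [hfalse]
        simpa using I2 a b
  · -- fresh pair
    have hg : W.get? (pvEdgeKey u v) = none :=
      (PySem.Dict.get?_eq_none_iff_contains W _).mpr (by simpa using hWk)
    have nmuv : v ∉ O.getD u [] := fun hm => hWk ((I2 u v).mp hm)
    have nmvu : u ∉ O.getD v [] := fun hm =>
      hWk (by rw [pvEdgeKey_comm]; exact (I2 v u).mp hm)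
    by_cases hvu : v = u
    · -- a self-loop seen for the first time
      subst hvu
      have hB : pvSkelStep (W, O) v (v, w)
          = (W.insert (pvEdgeKey v v) w, O.insert v (O.getD v [] ++ [v])) := by
        simp [pvSkelStep, hg, PySem.Dict.setdefault_of_contains _ _ hu, PySem.Dict.modify]
      rw [hB]
      refine ⟨?_, ⟨?_, ?_⟩, ?_⟩
      · simp only [pvStepA, pvRenderF_contains, hu, PySem.Dict.modify, pvRenderF_getD,
          pvInnerGet, nmuv, if_false, pvInfGT_none, if_true]
        rw [pvInnerInsert_not_mem _ _ nmuv, pvRenderF_insert]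
        rw [pvRenderF_getD, PySem.Dict.getD_insert_self]
        simp only [pvInnerGet, List.mem_append, List.mem_singleton, eq_self_iff_true,
          or_true, if_true, pvInfGT_some]
        rw [if_neg (by simp)]
        apply pvRenderF_congr
        intro a b
        unfold pvVal
        rw [PySem.Dict.getD_insert]
        by_cases hab : pvEdgeKey a b = pvEdgeKey v v
        · obtain ⟨ha, hb⟩ := pvEdgeKey_self_iff.mp hab
          simp [ha, hb]
        · rw [if_neg hab]
          by_cases hav : a = v
          · have hbv : b ≠ v := fun e => hab (by rw [hav, e])
            simp [hav, hbv]
          · simp [hav]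
      · rw [PySem.Dict.keys_insert_of_contains _ _ hu]
        exact hnd
      · intro a b
        rw [PySem.Dict.getD_insert, PySem.Dict.contains_insert]
        by_cases hav : a = v
        · rw [if_pos hav]
          simp only [List.mem_append, List.mem_singleton]
          constructor
          · rintro (hm | hb)
            · have hc := (I2 v b).mp hm
              simp [hav, hc]
            · have he : pvEdgeKey a b = pvEdgeKey v v := by rw [hav, hb]
              simp [he]
          · intro hor
            by_cases he : pvEdgeKey a b = pvEdgeKey v v
            · right; exact (pvEdgeKey_self_iff.mp he).2
            · left
              have hfalse : (pvEdgeKey a b == pvEdgeKey v v) = false := by simpa using he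
              have hc : W.contains (pvEdgeKey a b) = true := by simpa [hfalse] using hor
              rw [hav] at hc
              exact (I2 v b).mpr hc
        · rw [if_neg hav]
          constructor
          · intro hm
            simp [(I2 a b).mp hm]
          · intro hor
            by_cases he : pvEdgeKey a b = pvEdgeKey v v
            · exact absurd (pvEdgeKey_self_iff.mp he).1 hav
            · have hfalse : (pvEdgeKey a b == pvEdgeKey v v) = false := by simpa using he
              exact (I2 a b).mpr (by simpa [hfalse] using hor)
      · rw [PySem.Dict.contains_insert]
        simp
    · -- a genuinely new edge between distinct nodes
      have hne : u ≠ v := fun e => hvu e.symm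
      have hO1u : (O.setdefault v []).contains u = true := pvContains_setdefault_of O v [] hu
      have hO1v : (O.setdefault v []).contains v = true := pvContains_setdefault_self O v []
      obtain ⟨⟨hnd1, I21⟩, _⟩ := pvSetdefault_step W O v ⟨hnd, I2⟩
      have hgdu : (O.setdefault v []).getD u [] = O.getD u [] := pvGetD_setdefault O v u []
      have hgdv : (O.setdefault v []).getD v [] = O.getD v [] := pvGetD_setdefault O v v []
      have nm1uv : v ∉ (O.setdefault v []).getD u [] := by rw [hgdu]; exact nmuv
      have nm1vu : u ∉ (O.setdefault v []).getD v [] := by rw [hgdv]; exact nmvu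
      have hO2gv : ((O.setdefault v []).insert u ((O.setdefault v []).getD u [] ++ [v])).getD v []
          = (O.setdefault v []).getD v [] := by
        rw [PySem.Dict.getD_insert, if_neg hvu]
      have hO2u : ((O.setdefault v []).insert u ((O.setdefault v []).getD u [] ++ [v])).contains u
          = true := by
        rw [PySem.Dict.contains_insert]; simp
      have hO2v : ((O.setdefault v []).insert u ((O.setdefault v []).getD u [] ++ [v])).contains v
          = true := by
        rw [PySem.Dict.contains_insert]; simp [hO1v]
      have hB : pvSkelStep (W, O) u (v, w)
          = (W.insert (pvEdgeKey u v) w,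
             ((O.setdefault v []).insert u ((O.setdefault v []).getD u [] ++ [v])).insert v
               (((O.setdefault v []).insert u ((O.setdefault v []).getD u [] ++ [v])).getD v []
                 ++ [u])) := by
        simp [pvSkelStep, hg, hvu, PySem.Dict.modify]
      rw [hB]
      refine ⟨?_, ⟨?_, ?_⟩, ?_⟩
      · have hD1 : (if O.contains v = true then pvRenderF O (pvVal W)
            else (pvRenderF O (pvVal W)).insert v PySem.Dict.empty)
              = pvRenderF (O.setdefault v []) (pvVal W) := by
          by_cases hOv : O.contains v = true
          · rw [if_pos hOv, PySem.Dict.setdefault_of_contains _ _ hOv]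
          · rw [if_neg hOv]
            have h1 : (PySem.Dict.empty : PySem.Dict String Int)
                = PySem.Dict.mk (([] : List String).map (fun b => (b, pvVal W v b))) := rfl
            rw [h1, pvRenderF_insert]
            have h2 : O.insert v [] = O.setdefault v [] := by
              unfold PySem.Dict.setdefault PySem.Dict.insert
              rw [if_neg hOv, if_neg hOv]
            rw [h2]
            apply pvRenderF_congr
            intro a b
            by_cases hav : a = v
            · simp [hav]
            · simp [hav]
        simp only [pvStepA, pvRenderF_contains]
        rw [hD1]
        simp only [PySem.Dict.modify, pvRenderF_getD, pvInnerGet, nm1uv, if_false,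
          pvInfGT_none, if_true]
        rw [pvInnerInsert_not_mem _ _ nm1uv, pvRenderF_insert]
        rw [pvRenderF_getD, hO2gv]
        simp only [pvInnerGet, nm1vu, if_false, pvInfGT_none, if_true]
        rw [pvInnerInsert_not_mem _ _ nm1vu, pvRenderF_insert]
        apply pvRenderF_congr
        intro a b
        unfold pvVal
        rw [PySem.Dict.getD_insert]
        by_cases hab : pvEdgeKey a b = pvEdgeKey u v
        · rw [if_pos hab]
          rcases pvEdgeKey_inj hab with ⟨ha, hb⟩ | ⟨ha, hb⟩
          · simp [ha, hb, hne, hvu]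
          · simp [ha, hb]
        · rw [if_neg hab]
          by_cases hav : a = v
          · have hbu : b ≠ u := fun e => hab (by rw [hav, e, pvEdgeKey_comm])
            simp [hav, hbu, hvu]
          · by_cases hau : a = u
            · have hbv : b ≠ v := fun e => hab (by rw [hau, e])
              simp [hau, hbv, hne, hav]
            · simp [hav, hau]
      · rw [PySem.Dict.keys_insert_of_contains _ _ hO2v,
          PySem.Dict.keys_insert_of_contains _ _ hO1u]
        exact hnd1
      · intro a b
        rw [PySem.Dict.getD_insert, PySem.Dict.contains_insert, hO2gv, hgdv]
        by_cases hav : a = v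
        · rw [if_pos hav]
          simp only [List.mem_append, List.mem_singleton]
          constructor
          · rintro (hm | hb)
            · have hc := (I2 v b).mp hm
              simp [hav, hc]
            · have he : pvEdgeKey a b = pvEdgeKey u v := by rw [hav, hb, pvEdgeKey_comm]
              simp [he]
          · intro hor
            by_cases he : pvEdgeKey a b = pvEdgeKey u v
            · rcases pvEdgeKey_inj he with ⟨ha, hb⟩ | ⟨ha, hb⟩
              · exact absurd (hav.symm.trans ha) hvu
              · right; exact hb
            · left
              have hfalse : (pvEdgeKey a b == pvEdgeKey u v) = false := by simpa using he
              have hc : W.contains (pvEdgeKey a b) = true := by simpa [hfalse] using hor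
              rw [hav] at hc
              exact (I2 v b).mpr hc
        · rw [if_neg hav, PySem.Dict.getD_insert, hgdu]
          by_cases hau : a = u
          · rw [if_pos hau]
            simp only [List.mem_append, List.mem_singleton]
            constructor
            · rintro (hm | hb)
              · have hc := (I2 u b).mp hm
                simp [hau, hc]
              · have he : pvEdgeKey a b = pvEdgeKey u v := by rw [hau, hb]
                simp [he]
            · intro hor
              by_cases he : pvEdgeKey a b = pvEdgeKey u v
              · rcases pvEdgeKey_inj he with ⟨ha, hb⟩ | ⟨ha, hb⟩
                · right; exact hb
                · exact absurd (hau.symm.trans ha).symm hvu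
              · left
                have hfalse : (pvEdgeKey a b == pvEdgeKey u v) = false := by simpa using he
                have hc : W.contains (pvEdgeKey a b) = true := by simpa [hfalse] using hor
                rw [hau] at hc
                exact (I2 u b).mpr hc
          · rw [if_neg hau, pvGetD_setdefault]
            constructor
            · intro hm
              simp [(I2 a b).mp hm]
            · intro hor
              by_cases he : pvEdgeKey a b = pvEdgeKey u v
              · rcases pvEdgeKey_inj he with ⟨ha, _⟩ | ⟨ha, _⟩
                · exact absurd ha hau
                · exact absurd ha hav
              · have hfalse : (pvEdgeKey a b == pvEdgeKey u v) = false := by simpa using he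
                exact (I2 a b).mpr (by simpa [hfalse] using hor)
      · rw [PySem.Dict.contains_insert, PySem.Dict.contains_insert]
        simp

-- B's pass 1 computes the ghost machine's weight table
theorem pvSkelW_step (W : PySem.Dict (String × String) Int) (O : PySem.Dict String (List String))
    (u : String) (q : String × Int) (hnd : W.keys.Nodup) :
    (pvSkelStep (W, O) u q).1 = pvPass1Step W u q
      ∧ (pvSkelStep (W, O) u q).1.keys.Nodup := by
  rcases q with ⟨v, w⟩
  cases hg : W.get? (pvEdgeKey u v) with
  | none =>
    have hc : W.contains (pvEdgeKey u v) = false := by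
      rw [PySem.Dict.contains_eq_isSome_get?, hg]; rfl
    constructor
    · simp [pvSkelStep, pvPass1Step, hg, hc]
    · simp only [pvSkelStep, hg]
      exact PySem.Dict.nodup_keys_insert _ _ _ hnd
  | some x =>
    have hc : W.contains (pvEdgeKey u v) = true := by
      rw [PySem.Dict.contains_eq_isSome_get?, hg]; rfl
    have hgd : W.getD (pvEdgeKey u v) 0 = x := by
      rw [PySem.Dict.getD_eq_get?_getD, hg]; rfl
    by_cases hlt : w < x
    · have hmin : min x w = w := min_eq_right (le_of_lt hlt)
      constructor
      · simp [pvSkelStep, pvPass1Step, hg, hc, hgd, hlt, hmin]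
      · simp only [pvSkelStep, hg]
        exact PySem.Dict.nodup_keys_insert _ _ _ hnd
    · have hmin : min x w = x := min_eq_left (not_lt.mp hlt)
      have hself : W.insert (pvEdgeKey u v) x = W := pvInsertSelf hnd hg
      constructor
      · simp [pvSkelStep, pvPass1Step, hg, hc, hgd, hlt, hmin, hself]
      · simp only [pvSkelStep, hg, hmin, hself]
        exact hnd

theorem pvSkelW_inner (l : List (String × Int)) (u : String)
    (W : PySem.Dict (String × String) Int) (O : PySem.Dict String (List String))
    (hnd : W.keys.Nodup) :
    (l.foldl (fun s q => pvSkelStep s u q) (W, O)).1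
        = l.foldl (fun W q => pvPass1Step W u q) W
      ∧ (l.foldl (fun s q => pvSkelStep s u q) (W, O)).1.keys.Nodup := by
  induction l generalizing W O with
  | nil => exact ⟨rfl, hnd⟩
  | cons q t ih =>
    simp only [List.foldl_cons]
    obtain ⟨heq, hnd'⟩ := pvSkelW_step W O u q hnd
    obtain ⟨ih1, ih2⟩ := ih (pvSkelStep (W, O) u q).1 (pvSkelStep (W, O) u q).2 hnd'
    constructor
    · rw [← heq, ← ih1]
    · exact ih2

theorem pvSkelW_outer (gs : List (String × List (String × Int)))
    (W : PySem.Dict (String × String) Int) (O : PySem.Dict String (List String))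
    (hnd : W.keys.Nodup) :
    (gs.foldl (fun s p => p.2.foldl (fun s q => pvSkelStep s p.1 q) (s.1, s.2.setdefault p.1 [])) (W, O)).1
        = gs.foldl (fun W p => p.2.foldl (fun W q => pvPass1Step W p.1 q) W) W
      ∧ (gs.foldl (fun s p => p.2.foldl (fun s q => pvSkelStep s p.1 q) (s.1, s.2.setdefault p.1 [])) (W, O)).1.keys.Nodup := by
  induction gs generalizing W O with
  | nil => exact ⟨rfl, hnd⟩
  | cons p t ih =>
    simp only [List.foldl_cons]
    obtain ⟨heq, hnd'⟩ := pvSkelW_inner p.2 p.1 W (O.setdefault p.1 []) hnd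
    obtain ⟨ih1, ih2⟩ := ih _ _ hnd'
    constructor
    · rw [ih1, heq]
    · exact ih2

-- writing into a slot that already holds the same value leaves the render unchanged
theorem pvWrite_same (O : PySem.Dict String (List String)) (f : String → String → Int)
    (u v : String) (hnd : O.keys.Nodup) (hm : v ∈ O.getD u []) :
    (pvRenderF O f).modify u PySem.Dict.empty (fun inner => inner.insert v (f u v))
      = pvRenderF O f := by
  have hcu : O.contains u = true := pvMem_contains O hm
  simp only [PySem.Dict.modify, pvRenderF_getD]
  rw [pvInnerInsert_mem _ _ hm]
  have hmap : (O.getD u []).map (fun b => (b, if b = v then f u v else f u b))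
      = (O.getD u []).map (fun b => (b, f u b)) := by
    apply List.map_congr_left
    intro b _
    by_cases hb : b = v
    · subst hb; simp
    · simp [hb]
  rw [hmap]
  apply pvInsertSelf
  · rw [pvRenderF_keys]; exact hnd
  · rw [pvRenderF_get?, pvGet?_of_contains O u [] hcu]
    rfl

-- writing into a fresh slot appends the key and extends the render
theorem pvWrite_new (O : PySem.Dict String (List String)) (f : String → String → Int)
    (u v : String) (w : Int) (hnm : v ∉ O.getD u []) :
    (pvRenderF O f).modify u PySem.Dict.empty (fun inner => inner.insert v w)
      = pvRenderF (O.insert u (O.getD u [] ++ [v]))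
          (fun x y => if x = u then (if y = v then w else f u y) else f x y) := by
  simp only [PySem.Dict.modify, pvRenderF_getD]
  rw [pvInnerInsert_not_mem _ _ hnm, pvRenderF_insert]

-- the B-side step lemma: pass 2's unconditional writes render the ghost step
theorem pvStep2_eq (Wstar W : PySem.Dict (String × String) Int)
    (O : PySem.Dict String (List String)) (u : String) (q : String × Int)
    (h : pvInv W O) (hu : O.contains u = true) :
    pvPass2Step Wstar (pvRenderF O (pvVal Wstar)) u q.1
      = pvRenderF (pvSkelStep (W, O) u q).2 (pvVal Wstar) := by
  obtain ⟨hnd, I2⟩ := h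
  rcases q with ⟨v, w0⟩
  have hw : Wstar.getD (pvEdgeKey u v) 0 = pvVal Wstar u v := rfl
  have hwvu : pvVal Wstar u v = pvVal Wstar v u := by unfold pvVal; rw [pvEdgeKey_comm]
  by_cases hWk : W.contains (pvEdgeKey u v) = true
  · -- the pair was seen before: every write re-writes the value already in place
    have hg : W.get? (pvEdgeKey u v) = some (W.getD (pvEdgeKey u v) 0) :=
      pvGet?_of_contains W _ 0 hWk
    have muv : v ∈ O.getD u [] := (I2 u v).mpr hWk
    have mvu : u ∈ O.getD v [] := (I2 v u).mpr (by rw [pvEdgeKey_comm]; exact hWk)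
    have hOv : O.contains v = true := pvMem_contains O mvu
    have hB : (pvSkelStep (W, O) u (v, w0)).2 = O := by
      simp [pvSkelStep, hg]
    rw [hB]
    simp only [pvPass2Step, hw]
    rw [pvRenderF_setdefault, PySem.Dict.setdefault_of_contains _ _ hOv]
    rw [pvWrite_same O (pvVal Wstar) u v hnd muv]
    rw [hwvu, pvWrite_same O (pvVal Wstar) v u hnd mvu]
  · -- fresh pair: both directed entries are appended
    have hg : W.get? (pvEdgeKey u v) = none :=
      (PySem.Dict.get?_eq_none_iff_contains W _).mpr (by simpa using hWk)
    have nmuv : v ∉ O.getD u [] := fun hm => hWk ((I2 u v).mp hm)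
    have nmvu : u ∉ O.getD v [] := fun hm =>
      hWk (by rw [pvEdgeKey_comm]; exact (I2 v u).mp hm)
    by_cases hvu : v = u
    · -- first self-loop: the second write re-writes what the first one just wrote
      subst hvu
      have hB : (pvSkelStep (W, O) v (v, w0)).2 = O.insert v (O.getD v [] ++ [v]) := by
        simp [pvSkelStep, hg, PySem.Dict.setdefault_of_contains _ _ hu, PySem.Dict.modify]
      rw [hB]
      simp only [pvPass2Step, hw]
      rw [pvRenderF_setdefault, PySem.Dict.setdefault_of_contains _ _ hu]
      rw [pvWrite_new O (pvVal Wstar) v v _ nmuv]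
      have hfun : (fun x y => if x = v then (if y = v then pvVal Wstar v v else pvVal Wstar v y)
            else pvVal Wstar x y) = pvVal Wstar := by
        funext x y
        by_cases hx : x = v
        · by_cases hy : y = v <;> simp [hx, hy]
        · simp [hx]
      rw [hfun]
      have hnd' : (O.insert v (O.getD v [] ++ [v])).keys.Nodup := by
        rw [PySem.Dict.keys_insert_of_contains _ _ hu]; exact hnd
      have hm' : v ∈ (O.insert v (O.getD v [] ++ [v])).getD v [] := by
        rw [PySem.Dict.getD_insert_self]; simp
      exact pvWrite_same _ (pvVal Wstar) v v hnd' hm'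
    · -- a genuinely new edge between distinct nodes
      have hO1v : (O.setdefault v []).contains v = true := pvContains_setdefault_self O v []
      have hgdu : (O.setdefault v []).getD u [] = O.getD u [] := pvGetD_setdefault O v u []
      have hgdv : (O.setdefault v []).getD v [] = O.getD v [] := pvGetD_setdefault O v v []
      have nm1uv : v ∉ (O.setdefault v []).getD u [] := by rw [hgdu]; exact nmuv
      have hO2gv : ((O.setdefault v []).insert u ((O.setdefault v []).getD u [] ++ [v])).getD v []
          = O.getD v [] := by
        rw [PySem.Dict.getD_insert, if_neg hvu, hgdv]
      have nm2vu : u ∉ ((O.setdefault v []).insert u ((O.setdefault v []).getD u [] ++ [v])).getD v [] := by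
        rw [hO2gv]; exact nmvu
      have hB : (pvSkelStep (W, O) u (v, w0)).2
          = ((O.setdefault v []).insert u ((O.setdefault v []).getD u [] ++ [v])).insert v
              (((O.setdefault v []).insert u ((O.setdefault v []).getD u [] ++ [v])).getD v []
                ++ [u]) := by
        simp [pvSkelStep, hg, hvu, PySem.Dict.modify]
      rw [hB]
      simp only [pvPass2Step, hw]
      rw [pvRenderF_setdefault]
      rw [pvWrite_new (O.setdefault v []) (pvVal Wstar) u v _ nm1uv]
      have hfun1 : (fun x y => if x = u then (if y = v then pvVal Wstar u v else pvVal Wstar u y)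
            else pvVal Wstar x y) = pvVal Wstar := by
        funext x y
        by_cases hx : x = u
        · by_cases hy : y = v <;> simp [hx, hy]
        · simp [hx]
      rw [hfun1]
      rw [hwvu, pvWrite_new _ (pvVal Wstar) v u _ nm2vu]
      have hfun2 : (fun x y => if x = v then (if y = u then pvVal Wstar v u else pvVal Wstar v y)
            else pvVal Wstar x y) = pvVal Wstar := by
        funext x y
        by_cases hx : x = v
        · by_cases hy : y = u <;> simp [hx, hy]
        · simp [hx]
      rw [hfun2]

-- A-side fold lemmas (threading the invariant)
theorem pvFold_inner (l : List (String × Int)) (u : String)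
    (W : PySem.Dict (String × String) Int) (O : PySem.Dict String (List String))
    (h : pvInv W O) (hu : O.contains u = true) :
    l.foldl (fun D q => pvStepA D u q) (pvRenderF O (pvVal W))
        = pvRenderF (l.foldl (fun s q => pvSkelStep s u q) (W, O)).2
            (pvVal (l.foldl (fun s q => pvSkelStep s u q) (W, O)).1)
      ∧ pvInv (l.foldl (fun s q => pvSkelStep s u q) (W, O)).1
          (l.foldl (fun s q => pvSkelStep s u q) (W, O)).2
      ∧ (l.foldl (fun s q => pvSkelStep s u q) (W, O)).2.contains u = true := by
  induction l generalizing W O with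
  | nil => exact ⟨rfl, h, hu⟩
  | cons q t ih =>
    simp only [List.foldl_cons]
    obtain ⟨heq, hinv, hcon⟩ := pvStep_eq W O u q h hu
    rw [heq]
    exact ih (pvSkelStep (W, O) u q).1 (pvSkelStep (W, O) u q).2 hinv hcon

theorem pvFold_outer (gs : List (String × List (String × Int)))
    (W : PySem.Dict (String × String) Int) (O : PySem.Dict String (List String))
    (h : pvInv W O) :
    gs.foldl (fun D p => p.2.foldl (fun D q => pvStepA D p.1 q) (D.setdefault p.1 PySem.Dict.empty))
        (pvRenderF O (pvVal W))
        = pvRenderF (gs.foldl (fun s p => p.2.foldl (fun s q => pvSkelStep s p.1 q) (s.1, s.2.setdefault p.1 [])) (W, O)).2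
            (pvVal (gs.foldl (fun s p => p.2.foldl (fun s q => pvSkelStep s p.1 q) (s.1, s.2.setdefault p.1 [])) (W, O)).1) := by
  induction gs generalizing W O with
  | nil => rfl
  | cons p t ih =>
    simp only [List.foldl_cons]
    rw [pvRenderF_setdefault]
    obtain ⟨hinv1, hcon1⟩ := pvSetdefault_step W O p.1 h
    obtain ⟨heq, hinv2, _⟩ := pvFold_inner p.2 p.1 W (O.setdefault p.1 []) hinv1 hcon1
    rw [heq]
    exact ih _ _ hinv2

-- B-side fold lemmas (pass 2 with the fixed final table Wstar)
theorem pvFold2_inner (Wstar : PySem.Dict (String × String) Int) (l : List (String × Int))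
    (u : String) (W : PySem.Dict (String × String) Int) (O : PySem.Dict String (List String))
    (h : pvInv W O) (hu : O.contains u = true) :
    l.foldl (fun D q => pvPass2Step Wstar D u q.1) (pvRenderF O (pvVal Wstar))
        = pvRenderF (l.foldl (fun s q => pvSkelStep s u q) (W, O)).2 (pvVal Wstar) := by
  induction l generalizing W O with
  | nil => rfl
  | cons q t ih =>
    simp only [List.foldl_cons]
    obtain ⟨_, hinv, hcon⟩ := pvStep_eq W O u q h hu
    rw [pvStep2_eq Wstar W O u q h hu]
    exact ih (pvSkelStep (W, O) u q).1 (pvSkelStep (W, O) u q).2 hinv hcon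

theorem pvFold2_outer (Wstar : PySem.Dict (String × String) Int)
    (gs : List (String × List (String × Int)))
    (W : PySem.Dict (String × String) Int) (O : PySem.Dict String (List String))
    (h : pvInv W O) :
    gs.foldl (fun D p => p.2.foldl (fun D q => pvPass2Step Wstar D p.1 q.1)
        (D.setdefault p.1 PySem.Dict.empty)) (pvRenderF O (pvVal Wstar))
        = pvRenderF (gs.foldl (fun s p => p.2.foldl (fun s q => pvSkelStep s p.1 q) (s.1, s.2.setdefault p.1 [])) (W, O)).2
            (pvVal Wstar) := by
  induction gs generalizing W O with
  | nil => rfl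
  | cons p t ih =>
    simp only [List.foldl_cons]
    rw [pvRenderF_setdefault]
    obtain ⟨hinv1, hcon1⟩ := pvSetdefault_step W O p.1 h
    rw [pvFold2_inner Wstar p.2 p.1 W (O.setdefault p.1 []) hinv1 hcon1]
    obtain ⟨_, hinv2, _⟩ := pvFold_inner p.2 p.1 W (O.setdefault p.1 []) hinv1 hcon1
    exact ih _ _ hinv2

-- ===== VERDICT (by name: the statement is the Claim_ definition above) =====
theorem make_undirected_spec : Claim_equal_make_undirected := by
  intro graph _
  unfold Spec_make_undirected make_undirected make_undirected_alt pvRunA pvRunB pvWeights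
  have h0 : pvInv PySem.Dict.empty PySem.Dict.empty := by
    constructor
    · simp [PySem.Dict.keys, PySem.Dict.empty]
    · intro a b
      simp [PySem.Dict.getD, PySem.Dict.get?, PySem.Dict.contains, PySem.Dict.empty]
  have hndW : (PySem.Dict.empty : PySem.Dict (String × String) Int).keys.Nodup := by
    simp [PySem.Dict.keys, PySem.Dict.empty]
  obtain ⟨hWeq, _⟩ := pvSkelW_outer graph PySem.Dict.empty PySem.Dict.empty hndW
  have hrenderA : pvRenderF PySem.Dict.empty
      (pvVal (PySem.Dict.empty : PySem.Dict (String × String) Int)) = PySem.Dict.empty := by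
    simp [pvRenderF, PySem.Dict.empty]
  have hrenderB : pvRenderF PySem.Dict.empty
      (pvVal (graph.foldl (fun W p => p.2.foldl (fun W q => pvPass1Step W p.1 q) W)
        PySem.Dict.empty)) = PySem.Dict.empty := by
    simp [pvRenderF, PySem.Dict.empty]
  conv_lhs => rw [← hrenderA, pvFold_outer graph PySem.Dict.empty PySem.Dict.empty h0]
  conv_rhs => rw [← hrenderB, pvFold2_outer _ graph PySem.Dict.empty PySem.Dict.empty h0]
  rw [hWeq]
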